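-- pv_equiv track=rewrite | github.com/cirosantilli/project-euler-solutions | solvers/833.py | max_n_for_pair
-- ===== SOURCE A (Python) =====
-- def lucas_U_pair(n, i, j):
--     """
--     For fixed n define P = 4n + 2 and Lucas U-sequence:
--
--         U_0 = 0
--         U_1 = 1
--         U_k = P*U_{k-1} - U_{k-2}
--
--     Return (U_i, U_j).
--     """
--     P = 4 * n + 2
--     kmax = i if i > j else j
--
--     if kmax == 0:
--         return (0, 0)
--     if kmax == 1:
--         return (1 if i == 1 else 0, 1 if j == 1 else 0)
--
--     u0, u1 = 0, 1
--     ui = 1 if i == 1 else None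
--     uj = 1 if j == 1 else None
--
--     for k in range(2, kmax + 1):
--         u0, u1 = u1, P * u1 - u0
--         if k == i:
--             ui = u1
--         if k == j:
--             uj = u1
--
--     return ui, uj
--
-- def c_value(n, i, j):
--     """Compute c(n,i,j) = T(n) * U_i * U_j where T(n)=n(n+1)/2."""
--     t = n * (n + 1) // 2
--     ui, uj = lucas_U_pair(n, i, j)
--     return t * ui * uj
--
-- def max_n_for_pair(i, j, N):
--     """
--     For fixed coprime (i,j), c_value(n,i,j) is strictly increasing for n>=1.
--     Find largest n such that c_value(n,i,j) <= N.
--     """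
--     lo, hi = 0, 1
--     while c_value(hi, i, j) <= N:
--         hi *= 2
--     lo = hi // 2
--
--     while lo + 1 < hi:
--         mid = (lo + hi) // 2
--         if c_value(mid, i, j) <= N:
--             lo = mid
--         else:
--             hi = mid
--     return lo
-- ===== SOURCE B (Python) =====
-- def max_n_for_pair(i, j, N):
--     """Largest n with T(n)*U_i*U_j <= N; U terms via fast doubling (O(log k) per term)."""
--     def uu(P, k):
--         # (U_k, U_{k+1}) by fast doubling: U_{2d}=U_d(2U_{d+1}-P*U_d), U_{2d+1}=U_{d+1}^2-U_d^2
--         if k == 0: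
--             return (0, 1)
--         a, b = uu(P, k >> 1)
--         e = a * (2 * b - P * a)
--         o = b * b - a * a
--         if k & 1:
--             return (o, P * o - e)
--         return (e, o)
--
--     def c(n):
--         P = 4 * n + 2
--         return n * (n + 1) // 2 * uu(P, i)[0] * uu(P, j)[0]
--
--     hi = 1
--     while c(hi) <= N:
--         hi *= 2
--     lo = hi // 2
--     while lo + 1 < hi:
--         mid = (lo + hi) // 2
--         if c(mid) <= N:
--             lo = mid
--         else:
--             hi = mid
--     return lo
-- ===== Notes on version B (the rewrite author's own statement) =====
-- stated objective: faster
-- what changed: The Lucas U-sequence terms U_i and U_j are computed by fast doubling (O(log k) recursion on the index) instead of A's linear iteration of the recurrence up to max(i,j); the exponential-growth-plus-bisection search over n is kept.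
-- outside the precondition, e.g. on max_n_for_pair(0, 0, -1): A returns 0, B returns 0; on max_n_for_pair(-3, 1, -5): A returns 0, B raises RecursionError
import Mathlib
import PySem

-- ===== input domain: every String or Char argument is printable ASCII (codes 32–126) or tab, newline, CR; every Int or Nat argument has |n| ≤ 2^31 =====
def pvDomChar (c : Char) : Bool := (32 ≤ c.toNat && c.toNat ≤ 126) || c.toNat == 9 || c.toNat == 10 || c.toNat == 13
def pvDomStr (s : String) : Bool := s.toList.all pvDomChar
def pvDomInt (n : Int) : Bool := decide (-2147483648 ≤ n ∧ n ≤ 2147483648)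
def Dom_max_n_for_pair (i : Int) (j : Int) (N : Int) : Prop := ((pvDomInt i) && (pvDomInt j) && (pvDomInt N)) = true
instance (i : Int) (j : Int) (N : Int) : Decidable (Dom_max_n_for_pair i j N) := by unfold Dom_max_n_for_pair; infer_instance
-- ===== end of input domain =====

-- B computes the Lucas U-terms by fast doubling instead of A's linear iteration up to
-- max(i,j) (objective: faster); the doubling-then-bisection search over n is unchanged.
-- The Python while-loops are ported with a fuel of 24 iterations, which is never
-- exhausted on the domain (|N| ≤ 2^31 forces ≤ 17 doublings and ≤ 16 bisection steps).

-- ===== PORT A =====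
-- loop state: (u0, u1, ui, uj); None = Python's None
def lucas_U_pair (n : Int) (i : Int) (j : Int) : Option Int × Option Int :=
  let P := 4 * n + 2
  let kmax := if i > j then i else j
  if kmax = 0 then (some 0, some 0)
  else if kmax = 1 then (some (if i = 1 then 1 else 0), some (if j = 1 then 1 else 0))
  else
    let ui : Option Int := if i = 1 then some 1 else none
    let uj : Option Int := if j = 1 then some 1 else none
    let r := (PySem.List.pyRange 2 (kmax + 1) 1).foldl
      (fun (st : Int × Int × Option Int × Option Int) k =>
        let u0 := st.1; let u1 := st.2.1
        let u0' := u1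
        let u1' := P * u1 - u0
        let ui' := if k = i then some u1' else st.2.2.1
        let uj' := if k = j then some u1' else st.2.2.2
        (u0', u1', ui', uj'))
      (0, 1, ui, uj)
    (r.2.2.1, r.2.2.2)

def c_value (n : Int) (i : Int) (j : Int) : Int :=
  let t := PySem.Int.floordiv (n * (n + 1)) 2
  let p := lucas_U_pair n i j
  -- Python raises TypeError when a component is None; Pre_ excludes those inputs
  t * p.1.getD 0 * p.2.getD 0

def growHiA (i : Int) (j : Int) (N : Int) : Nat → Int → Int
  | 0, hi => hi
  | f + 1, hi => if c_value hi i j ≤ N then growHiA i j N f (hi * 2) else hi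

def bisectA (i : Int) (j : Int) (N : Int) : Nat → Int → Int → Int
  | 0, lo, _ => lo
  | f + 1, lo, hi =>
    if lo + 1 < hi then
      let mid := PySem.Int.floordiv (lo + hi) 2
      if c_value mid i j ≤ N then bisectA i j N f mid hi else bisectA i j N f lo mid
    else lo

def max_n_for_pair (i : Int) (j : Int) (N : Int) : Int :=
  let hi := growHiA i j N 24 1
  let lo := PySem.Int.floordiv hi 2
  bisectA i j N 24 lo hi

-- ===== PORT B =====
-- fast doubling: (U_k, U_{k+1}); k ≥ 1 under Pre_, so the Nat index is exact
def uuB (P : Int) : Nat → Int × Int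
  | 0 => (0, 1)
  | k + 1 =>
    let p := uuB P ((k + 1) / 2)
    let a := p.1
    let b := p.2
    let e := a * (2 * b - P * a)
    let o := b * b - a * a
    if (k + 1) % 2 = 1 then (o, P * o - e) else (e, o)
  termination_by k => k
  decreasing_by omega

def cB (n : Int) (i : Int) (j : Int) : Int :=
  let P := 4 * n + 2
  PySem.Int.floordiv (n * (n + 1)) 2 * (uuB P i.toNat).1 * (uuB P j.toNat).1

def growHiB (i : Int) (j : Int) (N : Int) : Nat → Int → Int
  | 0, hi => hi
  | f + 1, hi => if cB hi i j ≤ N then growHiB i j N f (hi * 2) else hi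

def bisectB (i : Int) (j : Int) (N : Int) : Nat → Int → Int → Int
  | 0, lo, _ => lo
  | f + 1, lo, hi =>
    if lo + 1 < hi then
      let mid := PySem.Int.floordiv (lo + hi) 2
      if cB mid i j ≤ N then bisectB i j N f mid hi else bisectB i j N f lo mid
    else lo

def max_n_for_pair_alt (i : Int) (j : Int) (N : Int) : Int :=
  let hi := growHiB i j N 24 1
  let lo := PySem.Int.floordiv hi 2
  bisectB i j N 24 lo hi

-- ===== PRECONDITION & SPEC =====
-- Pre_ excludes i ≤ 0 or j ≤ 0: there A diverges (the doubling loop never ends when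
-- U_i·U_j is identically 0 and N ≥ 0) or raises TypeError (a None sequence value),
-- and B's fast doubling does not recurse on negative indices either.
def Pre_max_n_for_pair (i : Int) (j : Int) (N : Int) : Prop := 1 ≤ i ∧ 1 ≤ j
instance (i : Int) (j : Int) (N : Int) : Decidable (Pre_max_n_for_pair i j N) := by
  unfold Pre_max_n_for_pair; infer_instance

def pvWitness_max_n_for_pair : Int × Int × Int := (2, 3, 1000000)

def Spec_max_n_for_pair (i : Int) (j : Int) (N : Int) (out : Int) : Prop := out = max_n_for_pair_alt i j N
instance (i : Int) (j : Int) (N : Int) (out : Int) : Decidable (Spec_max_n_for_pair i j N out) := by unfold Spec_max_n_for_pair; infer_instance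

-- ===== CLAIM (what is proved, stated in full; the proofs are below) =====
def Claim_equal_max_n_for_pair : Prop := ∀ (i : Int) (j : Int) (N : Int), Dom_max_n_for_pair i j N → Pre_max_n_for_pair i j N → Spec_max_n_for_pair i j N (max_n_for_pair i j N)

-- ===== LEMMAS AND PROOFS =====

-- the mathematical Lucas U-sequence for parameter P
def lucasU (P : Int) : Nat → Int
  | 0 => 0
  | 1 => 1
  | k + 2 => P * lucasU P (k + 1) - lucasU P k

-- Int-indexed view (A's loop counts with Ints)
def lucasUZ (P : Int) (k : Int) : Int := lucasU P k.toNat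

theorem lucasU_dbl (P : Int) (d : Nat) :
    lucasU P (2 * d) = lucasU P d * (2 * lucasU P (d + 1) - P * lucasU P d) ∧
    lucasU P (2 * d + 1) = lucasU P (d + 1) * lucasU P (d + 1) - lucasU P d * lucasU P d := by
  induction d with
  | zero => simp [lucasU]
  | succ d ih =>
    obtain ⟨h1, h2⟩ := ih
    have e1 : 2 * (d + 1) = (2 * d) + 2 := by ring
    have e2 : 2 * (d + 1) + 1 = (2 * d + 1) + 2 := by ring
    have r1 : lucasU P (2 * (d + 1)) = P * lucasU P (2 * d + 1) - lucasU P (2 * d) := by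
      rw [e1]; rfl
    have r2 : lucasU P (2 * (d + 1) + 1) = P * lucasU P (2 * (d + 1)) - lucasU P (2 * d + 1) := by
      rw [e2, e1]; rfl
    have rd : lucasU P (d + 2) = P * lucasU P (d + 1) - lucasU P d := rfl
    constructor
    · rw [r1, h1, h2, show d + 1 + 1 = d + 2 from rfl, rd]; ring
    · rw [r2, r1, h1, h2, show d + 1 + 1 = d + 2 from rfl, rd]; ring

theorem uuB_eq (P : Int) : ∀ k : Nat, uuB P k = (lucasU P k, lucasU P (k + 1)) := by
  intro k
  induction k using Nat.strong_induction_on with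
  | _ k ih =>
    match k with
    | 0 => simp [uuB, lucasU]
    | k + 1 =>
      have hlt : (k + 1) / 2 < k + 1 := by omega
      rw [uuB, ih _ hlt]
      rcases Nat.even_or_odd (k + 1) with ⟨d, hd⟩ | ⟨d, hd⟩
      · obtain ⟨g1, g2⟩ := lucasU_dbl P d
        simp only [hd]
        rw [show d + d = 2 * d from by ring]
        simp [g1, g2]
      · obtain ⟨g1, g2⟩ := lucasU_dbl P d
        have hdiv' : (2 * d + 1) / 2 = d := by omega
        have hmod' : (2 * d + 1) % 2 = 1 := by omega
        have r' : lucasU P (2 * d + 1 + 1) = P * lucasU P (2 * d + 1) - lucasU P (2 * d) := rfl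
        simp only [hd, hdiv', hmod']
        simp [g1, g2, r']

theorem lucasUZ_step (P : Int) (k : Int) (hk : 1 ≤ k) :
    lucasUZ P (k + 1) = P * lucasUZ P k - lucasUZ P (k - 1) := by
  unfold lucasUZ
  obtain ⟨m', rfl⟩ : ∃ m' : Nat, k = (m' : Int) + 1 := ⟨(k - 1).toNat, by omega⟩
  have h1 : (((m' : Int) + 1) + 1).toNat = m' + 2 := by omega
  have h2 : ((m' : Int) + 1).toNat = m' + 1 := by omega
  have h3 : (((m' : Int) + 1) - 1).toNat = m' := by omega
  rw [h1, h2, h3]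
  rfl

-- invariant for A's iterative loop
theorem foldA_inv (P i j s : Int) (hs : 2 ≤ s) : ∀ (cnt : Nat) (ui uj : Option Int),
    (PySem.List.pyRange s (s + cnt) 1).foldl
      (fun (st : Int × Int × Option Int × Option Int) k =>
        let u0 := st.1; let u1 := st.2.1
        let u0' := u1
        let u1' := P * u1 - u0
        let ui' := if k = i then some u1' else st.2.2.1
        let uj' := if k = j then some u1' else st.2.2.2
        (u0', u1', ui', uj'))
      (lucasUZ P (s - 2), lucasUZ P (s - 1), ui, uj)
    = (lucasUZ P (s + cnt - 2), lucasUZ P (s + cnt - 1),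
       if s ≤ i ∧ i < s + cnt then some (lucasUZ P i) else ui,
       if s ≤ j ∧ j < s + cnt then some (lucasUZ P j) else uj) := by
  intro cnt
  induction cnt with
  | zero =>
    intro ui uj
    rw [show s + ((0 : Nat) : Int) = s from by push_cast; ring,
      PySem.List.pyRange_one_eq_nil (le_refl s)]
    simp only [List.foldl_nil]
    have hni : ¬ (s ≤ i ∧ i < s) := by omega
    have hnj : ¬ (s ≤ j ∧ j < s) := by omega
    rw [if_neg hni, if_neg hnj]
  | succ c ih =>
    intro ui uj
    have hsplit : PySem.List.pyRange s (s + ((c + 1 : Nat) : Int)) 1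
        = PySem.List.pyRange s (s + (c : Int)) 1 ++ [s + (c : Int)] := by
      rw [show s + ((c + 1 : Nat) : Int) = (s + (c : Int)) + 1 from by push_cast; ring]
      exact PySem.List.pyRange_one_succ_right (by omega)
    rw [hsplit, List.foldl_append, ih]
    simp only [List.foldl_cons, List.foldl_nil]
    have hstep : P * lucasUZ P (s + (c : Int) - 1) - lucasUZ P (s + (c : Int) - 2)
        = lucasUZ P (s + (c : Int)) := by
      have h := lucasUZ_step P (s + (c : Int) - 1) (by omega)
      rw [show s + (c : Int) - 1 + 1 = s + (c : Int) from by ring,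
        show s + (c : Int) - 1 - 1 = s + (c : Int) - 2 from by ring] at h
      omega
    simp only [Prod.mk.injEq]
    refine ⟨?_, ?_, ?_, ?_⟩
    · exact congrArg (lucasUZ P) (by push_cast; ring)
    · rw [hstep]; exact congrArg (lucasUZ P) (by push_cast; ring)
    · by_cases hie : s + (c : Int) = i
      · rw [if_pos hie, if_pos (show s ≤ i ∧ i < s + ((c + 1 : Nat) : Int) by push_cast; omega),
          hstep, hie]
      · rw [if_neg hie]
        by_cases hir : s ≤ i ∧ i < s + (c : Int)
        · rw [if_pos hir, if_pos (show s ≤ i ∧ i < s + ((c + 1 : Nat) : Int) by push_cast at hir ⊢ <;> omega)]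
        · rw [if_neg hir, if_neg (show ¬ (s ≤ i ∧ i < s + ((c + 1 : Nat) : Int)) by push_cast at hir ⊢ <;> omega)]
    · by_cases hje : s + (c : Int) = j
      · rw [if_pos hje, if_pos (show s ≤ j ∧ j < s + ((c + 1 : Nat) : Int) by push_cast; omega),
          hstep, hje]
      · rw [if_neg hje]
        by_cases hjr : s ≤ j ∧ j < s + (c : Int)
        · rw [if_pos hjr, if_pos (show s ≤ j ∧ j < s + ((c + 1 : Nat) : Int) by push_cast at hjr ⊢ <;> omega)]
        · rw [if_neg hjr, if_neg (show ¬ (s ≤ j ∧ j < s + ((c + 1 : Nat) : Int)) by push_cast at hjr ⊢ <;> omega)]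

theorem lucas_U_pair_eq (n i j : Int) (hi : 1 ≤ i) (hj : 1 ≤ j) :
    lucas_U_pair n i j = (some (lucasUZ (4 * n + 2) i), some (lucasUZ (4 * n + 2) j)) := by
  unfold lucas_U_pair
  set P := 4 * n + 2 with hP
  set kmax := if i > j then i else j with hk
  have hik : i ≤ kmax := by rw [hk]; split <;> omega
  have hjk : j ≤ kmax := by rw [hk]; split <;> omega
  have hk1 : 1 ≤ kmax := by omega
  by_cases h0 : kmax = 0
  · omega
  rw [if_neg h0]
  by_cases h1 : kmax = 1
  · rw [if_pos h1]
    have hi1 : i = 1 := by omega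
    have hj1 : j = 1 := by omega
    simp [hi1, hj1, lucasUZ, lucasU]
  rw [if_neg h1]
  have hk2 : 2 ≤ kmax := by omega
  have key := foldA_inv P i j 2 (by omega) (kmax - 1).toNat
      (if i = 1 then some 1 else none) (if j = 1 then some 1 else none)
  have e0 : lucasUZ P (2 - 2) = 0 := by norm_num [lucasUZ, lucasU]
  have e1 : lucasUZ P (2 - 1) = 1 := by norm_num [lucasUZ, lucasU]
  have e2 : (2 : Int) + (((kmax - 1).toNat : Nat) : Int) = kmax + 1 := by omega
  rw [e0, e1, e2] at key
  have h1U : lucasUZ P 1 = 1 := by norm_num [lucasUZ, lucasU]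
  simp only [key, Prod.mk.injEq]
  constructor
  · by_cases hc : 2 ≤ i ∧ i < kmax + 1
    · rw [if_pos hc]
    · have hi1 : i = 1 := by omega
      subst hi1
      rw [if_neg hc, if_pos rfl, h1U]
  · by_cases hc : 2 ≤ j ∧ j < kmax + 1
    · rw [if_pos hc]
    · have hj1 : j = 1 := by omega
      subst hj1
      rw [if_neg hc, if_pos rfl, h1U]

theorem c_eq (n i j : Int) (hi : 1 ≤ i) (hj : 1 ≤ j) : c_value n i j = cB n i j := by
  simp [c_value, cB, lucas_U_pair_eq n i j hi hj, uuB_eq, lucasUZ]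

theorem growHi_eq (i j N : Int) (hi : 1 ≤ i) (hj : 1 ≤ j) :
    ∀ (f : Nat) (h : Int), growHiA i j N f h = growHiB i j N f h := by
  intro f
  induction f with
  | zero => intro h; rfl
  | succ f ih =>
    intro h
    rw [growHiA, growHiB, c_eq _ _ _ hi hj]
    split
    · exact ih _
    · rfl

theorem bisect_eq (i j N : Int) (hi : 1 ≤ i) (hj : 1 ≤ j) :
    ∀ (f : Nat) (lo hi' : Int), bisectA i j N f lo hi' = bisectB i j N f lo hi' := by
  intro f
  induction f with
  | zero => intro lo hi'; rfl
  | succ f ih =>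
    intro lo hi'
    rw [bisectA, bisectB]
    split
    · simp only [c_eq _ _ _ hi hj]
      split <;> exact ih _ _
    · rfl

-- ===== VERDICT (by name: the statement is the Claim_ definition above) =====
theorem max_n_for_pair_spec : Claim_equal_max_n_for_pair := by
  intro i j N _ hpre
  obtain ⟨hi, hj⟩ := hpre
  unfold Spec_max_n_for_pair max_n_for_pair max_n_for_pair_alt
  simp only [growHi_eq i j N hi hj, bisect_eq i j N hi hj]
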